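-- pv_equiv track=rewrite | github.com/2003100127/umiche | umiche/deduplicate/spikein/Preprocessing.py | _correct_block
-- ===== SOURCE A (Python) =====
-- from typing import Optional, List, Dict, Any
-- from collections import Counter, defaultdict
--
-- def hamming_distance(a: str, b: str) -> int:
--     if len(a) != len(b):
--         return max(len(a), len(b))  # 不同长时给个大值，避免被合并
--     return sum(ch1 != ch2 for ch1, ch2 in zip(a, b))
--
-- def _correct_block(umis: List[str], editham: int) -> Dict[str, str]:
--     """
--     基于 '邻接（adjacency）' 的纠错：频数降序依次作为中心，把 HD<=editham 的未指派 UMI 并到该中心。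
--     返回 mapping: raw_umi -> representative_umi
--     """
--     counts = Counter(umis)
--     # 按频数降序，频数相同按字典序稳定化
--     order = sorted(counts.keys(), key=lambda u: (-counts[u], u))
--     assigned = {}
--     for u in order:
--         if u in assigned:
--             continue
--         # u 成为自己簇的代表
--         assigned[u] = u
--         for v in order:
--             if v in assigned:
--                 continue
--             if len(v) != len(u):
--                 continue
--             if hamming_distance(u, v) <= editham:
--                 assigned[v] = u
--     return assigned
-- ===== SOURCE B (Python) =====
-- from typing import List, Dict
-- from collections import Counter
--
-- def hamming_distance(a: str, b: str) -> int:
--     if len(a) != len(b):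
--         return max(len(a), len(b))
--     return sum(ch1 != ch2 for ch1, ch2 in zip(a, b))
--
-- def _correct_block(umis: List[str], editham: int) -> Dict[str, str]:
--     counts = Counter(umis)
--     order = sorted(counts.keys(), key=lambda u: (-counts[u], u))
--     # worklist-shrinking cluster extraction: no 'assigned' bookkeeping, no membership
--     # tests — each round pops the current highest-ranked UMI as a representative,
--     # maps its near pool to it, and recurses on the far pool only.
--     mapping = {}
--     remaining = order
--     while remaining:
--         rep, pool = remaining[0], remaining[1:]
--         hit = [v for v in pool
--                if len(v) == len(rep) and hamming_distance(rep, v) <= editham]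
--         mapping[rep] = rep
--         for v in hit:
--             mapping[v] = rep
--         remaining = [v for v in pool
--                      if not (len(v) == len(rep) and hamming_distance(rep, v) <= editham)]
--     return mapping
-- ===== Notes on version B (the rewrite author's own statement) =====
-- stated objective: alternative
-- what changed: A keeps an 'assigned' mapping and repeatedly rescans the full frequency-sorted order with membership tests to skip assigned UMIs; B instead extracts clusters by shrinking a worklist: each round it takes the head of the remaining list as representative, splits the rest of the pool into near/far by Hamming distance, maps the near part, and continues on the far part only, so no membership test ('u in assigned') ever occurs.
import Mathlib
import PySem

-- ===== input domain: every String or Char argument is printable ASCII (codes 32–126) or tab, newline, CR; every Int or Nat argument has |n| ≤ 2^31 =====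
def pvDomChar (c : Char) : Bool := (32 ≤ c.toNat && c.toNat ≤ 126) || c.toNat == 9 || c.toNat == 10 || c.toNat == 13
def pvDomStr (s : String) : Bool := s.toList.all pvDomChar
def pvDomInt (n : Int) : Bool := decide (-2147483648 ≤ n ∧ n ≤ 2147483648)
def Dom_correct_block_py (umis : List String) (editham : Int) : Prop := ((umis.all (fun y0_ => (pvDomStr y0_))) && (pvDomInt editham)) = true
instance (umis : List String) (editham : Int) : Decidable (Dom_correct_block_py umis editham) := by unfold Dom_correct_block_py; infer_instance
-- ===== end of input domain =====

-- B replaces A's assigned-dict bookkeeping with worklist-shrinking cluster extraction: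
-- each round pops a representative, partitions the remaining pool by Hamming distance,
-- and recurses on the far part only (alternative decomposition, same cost).


-- shared helper (both Python files define the identical hamming_distance)
def hammingDistance (a b : String) : Int :=
  if a.toList.length ≠ b.toList.length then (max a.toList.length b.toList.length : Nat)
  else (a.toList.zip b.toList).foldl (fun s p => s + (if p.1 ≠ p.2 then 1 else 0)) 0

-- the frequency-sorted key order both Pythons compute identically
def umiOrder (umis : List String) : List String :=
  PySem.List.sorted2 (PySem.Dict.counter umis (κ := String)).keys
    (fun u => -((PySem.Dict.counter umis (κ := String)).getD u 0)) (fun u => u) false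

-- ===== PORT A =====
def correct_block_py (umis : List String) (editham : Int) : List (String × String) :=
  let order := umiOrder umis
  (order.foldl (fun asg u =>
    if asg.contains u then asg
    else
      let asg := asg.insert u u
      order.foldl (fun asg v =>
        if asg.contains v then asg
        else if v.toList.length ≠ u.toList.length then asg
        else if hammingDistance u v ≤ editham then asg.insert v u
        else asg) asg)
    (PySem.Dict.empty : PySem.Dict String String)).items

-- ===== PORT B =====
-- 'len(v) == len(rep) and hamming_distance(rep, v) <= editham'
def nearB (editham : Int) (rep v : String) : Bool :=
  decide (v.toList.length = rep.toList.length ∧ hammingDistance rep v ≤ editham)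

-- the while-loop over the shrinking worklist 'remaining'
def bLoop (editham : Int) : List String → PySem.Dict String String → PySem.Dict String String
  | [], mapping => mapping
  | rep :: pool, mapping =>
    let hit := pool.filter (fun v => nearB editham rep v)
    let mapping := hit.foldl (fun m v => m.insert v rep) (mapping.insert rep rep)
    bLoop editham (pool.filter (fun v => !nearB editham rep v)) mapping
  termination_by l => l.length
  decreasing_by
    simp only [List.length_cons, Nat.lt_succ_iff, List.length_unattach]
    exact le_trans (List.length_filter_le _ _) (by simp)

def correct_block_py_alt (umis : List String) (editham : Int) : List (String × String) :=
  (bLoop editham (umiOrder umis) PySem.Dict.empty).items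

-- ===== PRECONDITION & SPEC =====
def Spec_correct_block_py (umis : List String) (editham : Int) (out : List (String × String)) : Prop := out = correct_block_py_alt umis editham
instance (umis : List String) (editham : Int) (out : List (String × String)) : Decidable (Spec_correct_block_py umis editham out) := by unfold Spec_correct_block_py; infer_instance

-- ===== CLAIM (what is proved, stated in full; the proofs are below) =====
def Claim_equal_correct_block_py : Prop := ∀ (umis : List String) (editham : Int), Dom_correct_block_py umis editham → Spec_correct_block_py umis editham (correct_block_py umis editham)

-- ===== LEMMAS AND PROOFS =====

-- unfolding equations of the worklist loop
theorem bLoop_nil (e : Int) (m : PySem.Dict String String) : bLoop e [] m = m := by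
  rw [bLoop.eq_def]

theorem bLoop_cons (e : Int) (rep : String) (pool : List String)
    (m : PySem.Dict String String) :
    bLoop e (rep :: pool) m =
      bLoop e (pool.filter (fun v => !nearB e rep v))
        ((pool.filter (fun v => nearB e rep v)).foldl (fun m v => m.insert v rep)
          (m.insert rep rep)) := by
  rw [bLoop.eq_def]

-- membership in a dict after a loop of inserts at keys from l
theorem contains_foldl_insert (u : String) (l : List String)
    (d : PySem.Dict String String) (v : String) :
    (l.foldl (fun a w => a.insert w u) d).contains v = (d.contains v || decide (v ∈ l)) := by
  induction l generalizing d with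
  | nil => simp
  | cons w t ih =>
    rw [List.foldl_cons, ih]
    by_cases hvw : v = w
    · subst hvw; simp
    · have hb : (v == w) = false := beq_eq_false_iff_ne.mpr hvw
      simp [PySem.Dict.contains_insert, hb, hvw]

-- A's inner rescan of m (with the center u already assigned, m without duplicates)
-- is a plain insert loop over the unassigned near elements of m
theorem innerA (u : String) (e : Int) (m : List String) :
    ∀ (asg : PySem.Dict String String), m.Nodup → asg.contains u = true →
    m.foldl (fun a v =>
        if a.contains v then a
        else if v.toList.length ≠ u.toList.length then a
        else if hammingDistance u v ≤ e then a.insert v u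
        else a) asg
    = (m.filter (fun v => !asg.contains v && nearB e u v)).foldl
        (fun a v => a.insert v u) asg := by
  induction m with
  | nil => intro asg _ _; rfl
  | cons v t ih =>
    intro asg hnd hu
    have hndt : t.Nodup := hnd.of_cons
    have hvt : v ∉ t := (List.nodup_cons.mp hnd).1
    rw [List.foldl_cons, List.filter_cons]
    by_cases hc : asg.contains v = true
    · simp only [hc, if_true, Bool.not_true, Bool.false_and, Bool.false_eq_true, if_false]
      exact ih asg hndt hu
    · have hcf : asg.contains v = false := by simpa using hc
      simp only [hcf, Bool.false_eq_true, if_false, Bool.not_false, Bool.true_and]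
      by_cases hnear : nearB e u v = true
      · have ⟨hlen, hham⟩ := of_decide_eq_true hnear
        rw [if_neg (by simpa using hlen), if_pos hham, hnear, if_pos rfl, List.foldl_cons]
        have hu' : (asg.insert v u).contains u = true := by
          simp [PySem.Dict.contains_insert, hu]
        rw [ih _ hndt hu']
        congr 1
        apply List.filter_congr
        intro w hw
        have hwv : w ≠ v := fun h => hvt (h ▸ hw)
        have hb : (w == v) = false := beq_eq_false_iff_ne.mpr hwv
        simp [PySem.Dict.contains_insert, hb]
      · have hnf : nearB e u v = false := by simpa using hnear
        have : (if v.toList.length ≠ u.toList.length then asg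
            else if hammingDistance u v ≤ e then asg.insert v u else asg) = asg := by
          by_cases hlen : v.toList.length = u.toList.length
          · have hham : ¬ hammingDistance u v ≤ e := fun h =>
              hnear (decide_eq_true ⟨hlen, h⟩)
            rw [if_neg (by simpa using hlen), if_neg hham]
          · rw [if_pos (by simpa using hlen)]
        rw [this, hnf, if_neg Bool.false_ne_true]
        exact ih asg hndt hu

-- the two outer loops agree: A folds its body over the suffix L of order while B
-- recurses on the unassigned part of L; the hypothesis says the unassigned elements
-- of order are exactly the unassigned elements of L
theorem outer_eq (e : Int) (order : List String) (hnd : order.Nodup) :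
    ∀ (L : List String) (asg : PySem.Dict String String), L.Sublist order →
    order.filter (fun v => !asg.contains v) = L.filter (fun v => !asg.contains v) →
    L.foldl (fun asg u =>
      if asg.contains u then asg
      else
        let asg := asg.insert u u
        order.foldl (fun asg v =>
          if asg.contains v then asg
          else if v.toList.length ≠ u.toList.length then asg
          else if hammingDistance u v ≤ e then asg.insert v u
          else asg) asg) asg
    = bLoop e (L.filter (fun v => !asg.contains v)) asg := by
  intro L
  induction L with
  | nil => intro asg _ _; rw [List.filter_nil, List.foldl_nil, bLoop_nil]
  | cons u rest ih =>
    intro asg hsub H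
    have hsubr : rest.Sublist order := (List.sublist_cons_self u rest).trans hsub
    have hndL : (u :: rest).Nodup := hsub.nodup hnd
    have hur : u ∉ rest := (List.nodup_cons.mp hndL).1
    rw [List.foldl_cons]
    by_cases hc : asg.contains u = true
    · rw [if_pos hc]
      have hfc : (u :: rest).filter (fun v => !asg.contains v)
          = rest.filter (fun v => !asg.contains v) := by
        simp [hc]
      rw [hfc] at H ⊢
      exact ih asg hsubr H
    · have hcf : asg.contains u = false := by simpa using hc
      rw [if_neg hc]
      have hfc : (u :: rest).filter (fun v => !asg.contains v)
          = u :: rest.filter (fun v => !asg.contains v) := by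
        simp [hcf]
      rw [hfc] at H ⊢
      set p : String → Bool := fun v => !asg.contains v with hp
      set l' : List String := rest.filter p with hl'
      -- unfold one step of bLoop
      rw [bLoop_cons]
      set hit : List String := l'.filter (fun v => nearB e u v) with hhit
      -- A's inner pass produces exactly B's insert loop over hit
      have hthis : order.foldl (fun asg v =>
          if asg.contains v then asg
          else if v.toList.length ≠ u.toList.length then asg
          else if hammingDistance u v ≤ e then asg.insert v u
          else asg) (asg.insert u u)
          = hit.foldl (fun a v => a.insert v u) (asg.insert u u) := by
        rw [innerA u e order (asg.insert u u) hnd (PySem.Dict.contains_insert_self ..)]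
        congr 1
        have h1 : order.filter (fun v => !(asg.insert u u).contains v && nearB e u v)
            = (order.filter p).filter (fun v => !(v == u) && nearB e u v) := by
          rw [List.filter_filter]
          apply List.filter_congr
          intro v _
          simp only [PySem.Dict.contains_insert, hp, Bool.not_or]
          cases h : (v == u) <;> cases asg.contains v <;> simp
        rw [h1, H,
          show (u :: l').filter (fun v => !(v == u) && nearB e u v)
              = l'.filter (fun v => !(v == u) && nearB e u v) by simp]
        apply List.filter_congr
        intro v hv
        have : v ∈ rest := List.mem_of_mem_filter hv
        have hvu : (v == u) = false := by
          simp only [beq_eq_false_iff_ne]; intro h; exact hur (h ▸ this)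
        simp [hvu]
      rw [hthis]
      set asg2 := hit.foldl (fun a v => a.insert v u) (asg.insert u u) with hasg2
      set p2 : String → Bool := fun v => !asg2.contains v with hp2
      -- characterize p2
      have hchar : ∀ v, p2 v = (p v && !(v == u) && !(decide (v ∈ hit))) := by
        intro v
        simp only [hp2, hasg2, hp, contains_foldl_insert, PySem.Dict.contains_insert]
        cases (v == u) <;> cases asg.contains v <;> cases decide (v ∈ hit) <;> simp
      -- p2 refines p: filtering order or rest by p2 gives the same list
      have hfilt : ∀ (X : List String), X.filter p2 = (X.filter p).filter p2 := by
        intro X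
        rw [List.filter_filter]
        apply List.filter_congr
        intro v _
        rw [hchar v]
        cases p v <;> cases (v == u) <;> cases decide (v ∈ hit) <;> simp
      have H2 : order.filter p2 = rest.filter p2 := by
        rw [hfilt order, hfilt rest, H,
          show (u :: l').filter p2 = l'.filter p2 by simp [hchar u]]
      have hnext : rest.filter p2 = l'.filter (fun v => !nearB e u v) := by
        rw [hfilt rest, ← hl']
        apply List.filter_congr
        intro v hv
        have hvrest : v ∈ rest := List.mem_of_mem_filter hv
        have hvp : p v = true := List.of_mem_filter hv
        have hvu : (v == u) = false := by
          simp only [beq_eq_false_iff_ne]; intro h; exact hur (h ▸ hvrest)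
        rw [hchar v, hvp, hvu]
        by_cases hnear : nearB e u v = true
        · have : v ∈ hit := by rw [hhit]; exact List.mem_filter.mpr ⟨hv, hnear⟩
          simp [this, hnear]
        · have hnf : nearB e u v = false := by simpa using hnear
          have : v ∉ hit := fun h => hnear (List.of_mem_filter h)
          simp [this, hnf]
      have := ih asg2 hsubr H2
      rw [hnext] at this
      exact this

-- ===== VERDICT (by name: the statement is the Claim_ definition above) =====
theorem correct_block_py_spec : Claim_equal_correct_block_py := by
  intro umis editham _
  unfold Spec_correct_block_py correct_block_py correct_block_py_alt
  have hnd : (umiOrder umis).Nodup := by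
    have hperm := PySem.List.sorted2_perm
      (xs := (PySem.Dict.counter umis (κ := String)).keys)
      (k1 := fun u => -((PySem.Dict.counter umis (κ := String)).getD u 0))
      (k2 := fun u => u) (rev := false)
    exact hperm.symm.nodup (PySem.Dict.nodup_keys_counter umis)
  have h := outer_eq editham (umiOrder umis) hnd (umiOrder umis) PySem.Dict.empty
    (List.Sublist.refl _) rfl
  have hfull : (umiOrder umis).filter (fun v => !(PySem.Dict.empty : PySem.Dict String String).contains v)
      = umiOrder umis := by
    simp [PySem.Dict.contains_empty]
  rw [hfull] at h
  exact congrArg PySem.Dict.items h
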